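-- pv_equiv track=rewrite | github.com/amandavical/estrutura-de-dados | lista1/recursividade.py | zeraImpares
-- ===== SOURCE A (Python) =====
-- def zeraImpares(n):
--     if n < 10:
--         return n
--     menor_resto = zeraImpares(n // 10) #numero sem o ultimo digito
--     ultimo_digito = n % 10 #ultimo digito
--     if ultimo_digito % 2 == 1:
--         return menor_resto * 10 # Se ímpar, zera (multiplica por 10)
--     else:
--         return menor_resto * 10 + ultimo_digito # Se par, mantém
-- ===== SOURCE B (Python) =====
-- def zeraImpares(n):
--     if n < 10:
--         return n
--     # iterative: peel digits into a list, then rebuild most-significant-first,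
--     # keeping the leading digit and zeroing the odd ones
--     digits = []
--     m = n
--     while m >= 10:
--         digits.append(m % 10)
--         m //= 10
--     result = m
--     for d in reversed(digits):
--         result = result * 10 + (0 if d % 2 == 1 else d)
--     return result
-- ===== Notes on version B (the rewrite author's own statement) =====
-- stated objective: alternative
-- what changed: Replaces the recursion with an explicit iterative loop that collects the digits into a list and then folds them back most-significant-first, zeroing the odd ones while keeping the leading digit.
import Mathlib
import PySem

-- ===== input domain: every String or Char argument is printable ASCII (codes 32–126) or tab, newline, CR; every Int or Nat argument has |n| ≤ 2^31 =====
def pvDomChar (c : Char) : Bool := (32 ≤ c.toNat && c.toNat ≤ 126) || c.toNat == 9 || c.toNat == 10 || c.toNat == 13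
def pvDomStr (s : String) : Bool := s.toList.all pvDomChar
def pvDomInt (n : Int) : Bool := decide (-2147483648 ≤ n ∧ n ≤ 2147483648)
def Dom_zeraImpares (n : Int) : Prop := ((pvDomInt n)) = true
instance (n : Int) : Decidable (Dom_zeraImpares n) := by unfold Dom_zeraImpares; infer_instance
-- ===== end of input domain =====

-- B replaces A's recursion by an explicit loop that collects the digits in a list and
-- folds them back most-significant-first (alternative decomposition, same cost).


-- termination helper for both ports' recursion on n // 10
theorem pv_div10_toNat_lt (n : Int) (h : ¬ n < 10) :
    (PySem.Int.floordiv n 10).toNat < n.toNat := by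
  rw [PySem.Int.floordiv_eq_ediv_of_pos (by norm_num)]
  have h1 : n / 10 * 10 ≤ n := Int.ediv_mul_le n (by norm_num)
  have h2 : 0 ≤ n / 10 := Int.ediv_nonneg (by omega) (by norm_num)
  omega

-- ===== PORT A =====
def zeraImpares (n : Int) : Int :=
  if n < 10 then n
  else
    let menor_resto := zeraImpares (PySem.Int.floordiv n 10)
    let ultimo_digito := PySem.Int.mod n 10
    if PySem.Int.mod ultimo_digito 2 == 1 then menor_resto * 10
    else menor_resto * 10 + ultimo_digito
termination_by n.toNat
decreasing_by exact pv_div10_toNat_lt n (by omega)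

-- ===== PORT B =====
-- the while loop: peel digits of m (least significant first) into the list
def zeraLoop (m : Int) (digits : List Int) : Int × List Int :=
  if m ≥ 10 then zeraLoop (PySem.Int.floordiv m 10) (digits ++ [PySem.Int.mod m 10])
  else (m, digits)
termination_by m.toNat
decreasing_by exact pv_div10_toNat_lt m (by omega)

-- the body of the rebuild loop: result = result * 10 + (0 if d % 2 == 1 else d)
def zeraStep (result d : Int) : Int :=
  result * 10 + (if PySem.Int.mod d 2 == 1 then 0 else d)

def zeraImpares_alt (n : Int) : Int :=
  if n < 10 then n
  else
    let p := zeraLoop n []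
    p.2.reverse.foldl zeraStep p.1

-- ===== PRECONDITION & SPEC =====
def Spec_zeraImpares (n : Int) (out : Int) : Prop := out = zeraImpares_alt n
instance (n : Int) (out : Int) : Decidable (Spec_zeraImpares n out) := by unfold Spec_zeraImpares; infer_instance

-- ===== CLAIM (what is proved, stated in full; the proofs are below) =====
def Claim_equal_zeraImpares : Prop := ∀ (n : Int), Dom_zeraImpares n → Spec_zeraImpares n (zeraImpares n)

-- ===== LEMMAS AND PROOFS =====
theorem zeraImpares_step (n : Int) (h : ¬ n < 10) :
    zeraImpares n = zeraStep (zeraImpares (PySem.Int.floordiv n 10)) (PySem.Int.mod n 10) := by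
  rw [zeraImpares]
  simp only [if_neg h, zeraStep]
  split <;> omega

theorem zeraLoop_fold (k : Nat) : ∀ (n : Int) (acc : List Int), n.toNat ≤ k →
    ((zeraLoop n acc).2.reverse).foldl zeraStep (zeraLoop n acc).1
      = acc.reverse.foldl zeraStep (zeraImpares n) := by
  induction k with
  | zero =>
    intro n acc hk
    have hn : n < 10 := by omega
    rw [zeraLoop, zeraImpares, if_pos hn, if_neg (by omega)]
  | succ k ih =>
    intro n acc hk
    by_cases hn : n < 10
    · rw [zeraLoop, zeraImpares, if_pos hn, if_neg (by omega)]
    · rw [zeraLoop, if_pos (by omega)]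
      rw [ih _ _ (by have := pv_div10_toNat_lt n hn; omega)]
      rw [zeraImpares_step n hn]
      simp

theorem zeraImpares_eq_alt (n : Int) : zeraImpares n = zeraImpares_alt n := by
  by_cases hn : n < 10
  · rw [zeraImpares, zeraImpares_alt, if_pos hn, if_pos hn]
  · rw [zeraImpares_alt, if_neg hn]
    have := zeraLoop_fold n.toNat n [] (le_refl _)
    simpa using this.symm

-- ===== VERDICT (by name: the statement is the Claim_ definition above) =====
theorem zeraImpares_spec : Claim_equal_zeraImpares := by
  intro n _
  exact zeraImpares_eq_alt n
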